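-- pv_equiv track=rewrite | github.com/asafmaman101/imp_reg_htf | tensor_factorization/evaluation/tensor_rank_metrics.py | __get_subsets_of_size_exclude_symmetric
-- ===== SOURCE A (Python) =====
-- import itertools
--
-- def __get_subsets_of_size_exclude_symmetric(indices, k):
--     subsets_of_size_k = list(itertools.combinations(indices, k))
--     if k != len(indices) // 2:
--         return subsets_of_size_k
--
--     # If i is exactly len(arr) // 2, need to remove subsets that perform the same partition.
--     subsets_to_return = []
--     existing_partitions = set()
--     for subset in subsets_of_size_k:
--         frozen_subset = frozenset(subset)
--         frozen_subset_comp = frozenset([j for j in indices if j not in frozen_subset])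
--
--         if frozen_subset not in existing_partitions:
--             subsets_to_return.append(subset)
--
--         existing_partitions.add(frozen_subset)
--         existing_partitions.add(frozen_subset_comp)
--
--     return subsets_to_return
-- ===== SOURCE B (Python) =====
-- import itertools
--
-- def __get_subsets_of_size_exclude_symmetric(indices, k):
--     # In the symmetric case (2*k == len(indices)) each kept partition is exactly
--     # a subset containing indices[0]: emit indices[0] prepended to the (k-1)-subsets
--     # of the rest, never generating (nor deduplicating) the complementary halves.
--     if indices and 2 * k == len(indices):
--         first, rest = indices[0], indices[1:]
--         return [(first,) + c for c in itertools.combinations(rest, k - 1)]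
--     return list(itertools.combinations(indices, k))
-- ===== Notes on version B (the rewrite author's own statement) =====
-- stated objective: faster
-- what changed: In the symmetric case 2*k == len(indices) B emits indices[0] prepended to the (k-1)-combinations of the rest instead of generating all C(n,k) combinations and deduplicating complementary halves with a set of frozensets; otherwise B returns the combinations directly. Pre_ excludes negative k (A raises ValueError, so does B) and, when k == len(indices)//2, lists with duplicate values: there A's frozenset-based dedup collapses equal values and which duplicates survive is a set-semantics corner on which A's and B's outputs are equally defensible.
-- outside the precondition, e.g. on __get_subsets_of_size_exclude_symmetric([1, 2, 2, 3], 2): A returns [(1, 2), (1, 3), (2, 3)], B returns [(1, 2), (1, 2), (1, 3)]; on __get_subsets_of_size_exclude_symmetric([1, 1, 2], 1): A returns [(1,)], B returns [(1,), (1,), (2,)]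
import Mathlib
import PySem

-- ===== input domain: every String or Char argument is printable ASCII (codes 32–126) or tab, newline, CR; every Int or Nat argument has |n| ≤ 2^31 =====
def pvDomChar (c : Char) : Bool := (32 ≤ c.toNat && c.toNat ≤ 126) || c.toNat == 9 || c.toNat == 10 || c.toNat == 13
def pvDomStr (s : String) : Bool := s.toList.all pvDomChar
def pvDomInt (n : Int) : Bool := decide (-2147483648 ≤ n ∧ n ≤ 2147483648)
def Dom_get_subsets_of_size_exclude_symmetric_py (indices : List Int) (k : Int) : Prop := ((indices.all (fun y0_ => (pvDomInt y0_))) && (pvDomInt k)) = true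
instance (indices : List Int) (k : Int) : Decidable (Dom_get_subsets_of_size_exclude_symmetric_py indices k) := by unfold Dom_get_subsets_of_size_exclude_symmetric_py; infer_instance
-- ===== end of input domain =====

-- B replaces A's generate-all-then-deduplicate of complementary halves (symmetric case) by
-- directly emitting indices[0] prepended to the (k-1)-combinations of the rest (faster, asymptotic).

-- ===== PORT A =====
-- itertools.combinations(l, m) in lexicographic index order (exact; shared by both ports,
-- both Pythons call itertools.combinations)
def pvCombos : Nat → List Int → List (List Int)
  | 0, _ => [[]]
  | _+1, [] => []
  | m+1, x :: xs => ((pvCombos m xs).map (fun c => x :: c)) ++ pvCombos (m+1) xs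

-- frozenset(l), represented canonically as the sorted list of distinct elements:
-- equality of canonical forms = frozenset equality, membership preserved (exact for Int elements)
def pvFz (l : List Int) : List Int := l.toFinset.sort (· ≤ ·)

-- one iteration of A's `for subset in subsets_of_size_k` loop
def pvStepA (indices : List Int) (st : List (List Int) × PySem.Set (List Int))
    (subset : List Int) : List (List Int) × PySem.Set (List Int) :=
  let f := pvFz subset
  let fc := pvFz (indices.filter (fun j => decide (j ∉ f)))
  (if f ∈ st.2 then st.1 else st.1 ++ [subset],
   PySem.Set.add (PySem.Set.add st.2 f) fc)

def get_subsets_of_size_exclude_symmetric_py (indices : List Int) (k : Int) : List (List Int) :=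
  -- k < 0: Python's itertools.combinations raises ValueError — excluded by Pre_
  let subsets_of_size_k := if k < 0 then [] else pvCombos k.toNat indices
  if k ≠ PySem.Int.floordiv (indices.length : Int) 2 then subsets_of_size_k
  else (subsets_of_size_k.foldl (pvStepA indices) ([], PySem.Set.empty)).1

-- ===== PORT B =====
def get_subsets_of_size_exclude_symmetric_py_alt (indices : List Int) (k : Int) : List (List Int) :=
  match indices with
  | first :: rest =>
    if 2 * k = (rest.length : Int) + 1 then
      (pvCombos (k - 1).toNat rest).map (fun c => first :: c)
    else if k < 0 then [] else pvCombos k.toNat (first :: rest)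
  | [] => if k < 0 then [] else pvCombos k.toNat []

-- ===== PRECONDITION & SPEC =====
-- Pre_ excludes (a) k < 0, where Python A raises ValueError (so does B), and (b) in the
-- symmetric case k = len(indices)//2, lists with duplicate values: there A's frozenset-based
-- dedup collapses equal values and which duplicates survive is a set-semantics corner on which
-- A's and B's outputs are equally defensible.
def Pre_get_subsets_of_size_exclude_symmetric_py (indices : List Int) (k : Int) : Prop :=
  0 ≤ k ∧ (k = PySem.Int.floordiv (indices.length : Int) 2 → indices.Nodup)
instance (indices : List Int) (k : Int) : Decidable (Pre_get_subsets_of_size_exclude_symmetric_py indices k) := by unfold Pre_get_subsets_of_size_exclude_symmetric_py; infer_instance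

def pvWitness_get_subsets_of_size_exclude_symmetric_py : List Int × Int := ([0, 1, 2, 3], 2)

def Spec_get_subsets_of_size_exclude_symmetric_py (indices : List Int) (k : Int) (out : List (List Int)) : Prop := out = get_subsets_of_size_exclude_symmetric_py_alt indices k
instance (indices : List Int) (k : Int) (out : List (List Int)) : Decidable (Spec_get_subsets_of_size_exclude_symmetric_py indices k out) := by unfold Spec_get_subsets_of_size_exclude_symmetric_py; infer_instance

-- ===== CLAIM (what is proved, stated in full; the proofs are below) =====
def Claim_equal_get_subsets_of_size_exclude_symmetric_py : Prop := ∀ (indices : List Int) (k : Int), Dom_get_subsets_of_size_exclude_symmetric_py indices k → Pre_get_subsets_of_size_exclude_symmetric_py indices k → Spec_get_subsets_of_size_exclude_symmetric_py indices k (get_subsets_of_size_exclude_symmetric_py indices k)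

-- ===== LEMMAS AND PROOFS =====

theorem pvMem_fz {x : Int} {l : List Int} : x ∈ pvFz l ↔ x ∈ l := by
  simp [pvFz, Finset.mem_sort]

theorem pvFz_eq_iff {a b : List Int} : pvFz a = pvFz b ↔ a.toFinset = b.toFinset := by
  constructor
  · intro h
    have := congrArg List.toFinset h
    simpa [pvFz, Finset.sort_toFinset] using this
  · intro h; simp [pvFz, h]

theorem pvCombos_sublist : ∀ (l : List Int) (m : Nat) (c : List Int),
    c ∈ pvCombos m l → c.Sublist l ∧ c.length = m := by
  intro l
  induction l with
  | nil =>
    intro m c h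
    cases m with
    | zero => simp [pvCombos] at h; simp [h]
    | succ m => simp [pvCombos] at h
  | cons x xs ih =>
    intro m c h
    cases m with
    | zero => simp [pvCombos] at h; simp [h]
    | succ m =>
      simp only [pvCombos, List.mem_append, List.mem_map] at h
      rcases h with ⟨c', hc', rfl⟩ | h
      · obtain ⟨hs, hl⟩ := ih m c' hc'
        exact ⟨List.Sublist.cons₂ x hs, by simp [hl]⟩
      · obtain ⟨hs, hl⟩ := ih (m+1) c h
        exact ⟨hs.cons x, hl⟩

theorem pvCombos_complete : ∀ {c l : List Int}, c.Sublist l → c ∈ pvCombos c.length l := by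
  intro c l h
  induction h with
  | slnil => simp [pvCombos]
  | @cons c l y h ih =>
    cases c with
    | nil => simp [pvCombos]
    | cons a c' =>
      simp only [List.length_cons, pvCombos, List.mem_append]
      exact Or.inr ih
  | @cons₂ c l y h ih =>
    simp only [List.length_cons, pvCombos, List.mem_append, List.mem_map]
    exact Or.inl ⟨c, ih, rfl⟩

theorem pvCombos_pairwise : ∀ (l : List Int), l.Nodup → ∀ (m : Nat),
    (pvCombos m l).Pairwise (fun a b => a.toFinset ≠ b.toFinset) := by
  intro l
  induction l with
  | nil =>
    intro _ m
    cases m with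
    | zero => simp [pvCombos]
    | succ m => simp [pvCombos]
  | cons x xs ih =>
    intro hnd m
    have hx : x ∉ xs := by simp [List.nodup_cons] at hnd; exact hnd.1
    have hxs : xs.Nodup := by simp [List.nodup_cons] at hnd; exact hnd.2
    cases m with
    | zero => simp [pvCombos]
    | succ m =>
      simp only [pvCombos]
      rw [List.pairwise_append]
      refine ⟨?_, ih hxs (m+1), ?_⟩
      · rw [List.pairwise_map]
        refine (ih hxs m).imp_of_mem ?_
        intro a b ha hb hne
        have hax : x ∉ a := fun hmem => hx ((pvCombos_sublist xs m a ha).1.subset hmem)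
        have hbx : x ∉ b := fun hmem => hx ((pvCombos_sublist xs m b hb).1.subset hmem)
        intro heq
        apply hne
        have : (insert x a.toFinset).erase x = (insert x b.toFinset).erase x := by
          simpa [List.toFinset_cons] using congrArg (·.erase x) heq
        rwa [Finset.erase_insert (by simpa using hax),
             Finset.erase_insert (by simpa using hbx)] at this
      · intro a ha b hb
        simp only [List.mem_map] at ha
        obtain ⟨c, _, rfl⟩ := ha
        have hbx : x ∉ b := fun hmem => hx ((pvCombos_sublist xs (m+1) b hb).1.subset hmem)
        intro heq
        have : x ∈ b.toFinset := by rw [← heq]; simp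
        exact hbx (by simpa using this)

-- a sublist of a duplicate-free list is recovered by filtering on membership
theorem pvFilter_mem_of_sublist : ∀ {s l : List Int}, s.Sublist l → l.Nodup →
    l.filter (fun j => decide (j ∈ s)) = s := by
  intro s l h
  induction h with
  | slnil => simp
  | @cons s l y h ih =>
    intro hnd
    have hy : y ∉ l := (List.nodup_cons.mp hnd).1
    have hys : y ∉ s := fun hm => hy (h.subset hm)
    simp only [List.filter_cons, decide_eq_true_eq]
    rw [if_neg (by simpa using hys)]
    exact ih (List.nodup_cons.mp hnd).2
  | @cons₂ s l y h ih =>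
    intro hnd
    have hy : y ∉ l := (List.nodup_cons.mp hnd).1
    simp only [List.filter_cons]
    rw [if_pos (by simp)]
    congr 1
    rw [List.filter_congr (l := l) (q := fun j => decide (j ∈ s))
        (by intro j hj; simp only [List.mem_cons]
            have hjy : j ≠ y := fun h => hy (h ▸ hj)
            simp [hjy])]
    exact ih (List.nodup_cons.mp hnd).2

-- length of the complement filter
theorem pvComp_length {s l : List Int} (h : s.Sublist l) (hnd : l.Nodup) :
    (l.filter (fun j => decide (j ∉ pvFz s))).length + s.length = l.length := by
  have hmem : (l.filter (fun j => decide (j ∈ pvFz s))) = l.filter (fun j => decide (j ∈ s)) := by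
    apply List.filter_congr; intro j _; simp [pvMem_fz]
  have hsplit := List.length_eq_length_filter_add (l := l) (fun j => decide (j ∈ pvFz s))
  have : (l.filter fun j => !decide (j ∈ pvFz s)) = l.filter (fun j => decide (j ∉ pvFz s)) := by
    apply List.filter_congr; intro j _; simp
  rw [this, hmem, pvFilter_mem_of_sublist h hnd] at hsplit
  omega

-- skip phase: every subset's frozenset is already present, nothing is appended
theorem pvFoldl_skip (indices : List Int) : ∀ (ss : List (List Int))
    (acc : List (List Int)) (ex : PySem.Set (List Int)),
    (∀ s ∈ ss, pvFz s ∈ ex) → (ss.foldl (pvStepA indices) (acc, ex)).1 = acc := by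
  intro ss
  induction ss with
  | nil => intro acc ex _; simp
  | cons s tail ih =>
    intro acc ex h
    simp only [List.foldl_cons, pvStepA]
    rw [if_pos (h s (by simp))]
    apply ih
    intro t ht
    have := h t (by simp [ht])
    simp [PySem.Set.mem_add, this]

-- keep phase: all frozensets fresh and pairwise distinct, no subset equals a complement
theorem pvFoldl_keep (indices : List Int) : ∀ (ss : List (List Int))
    (acc : List (List Int)) (ex : PySem.Set (List Int)),
    (∀ s ∈ ss, pvFz s ∉ ex) →
    ss.Pairwise (fun a b => pvFz a ≠ pvFz b) →
    (∀ s ∈ ss, ∀ t ∈ ss, pvFz t ≠ pvFz (indices.filter (fun j => decide (j ∉ pvFz s)))) →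
    (ss.foldl (pvStepA indices) (acc, ex)).1 = acc ++ ss ∧
    (∀ u, (u ∈ ex ∨ ∃ s ∈ ss, u = pvFz s ∨
        u = pvFz (indices.filter (fun j => decide (j ∉ pvFz s)))) →
      u ∈ (ss.foldl (pvStepA indices) (acc, ex)).2) := by
  intro ss
  induction ss with
  | nil => intro acc ex _ _ _; exact ⟨by simp, by simp⟩
  | cons s tail ih =>
    intro acc ex hfresh hpw hcomp
    simp only [List.foldl_cons, pvStepA]
    rw [if_neg (hfresh s (by simp))]
    have hpw' := (List.pairwise_cons.mp hpw)
    have htail := ih (acc ++ [s]) _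
      (by
        intro t ht
        rw [PySem.Set.mem_add, PySem.Set.mem_add]
        push Not
        refine ⟨⟨hfresh t (by simp [ht]), ?_⟩, ?_⟩
        · exact (hpw'.1 t ht).symm
        · exact hcomp s (by simp) t (by simp [ht]))
      hpw'.2
      (by intro a ha b hb; exact hcomp a (by simp [ha]) b (by simp [hb]))
    refine ⟨by rw [htail.1]; simp, ?_⟩
    intro u hu
    apply htail.2
    rcases hu with hu | ⟨s', hs', hu⟩
    · left; simp [PySem.Set.mem_add, hu]
    · rcases List.mem_cons.mp hs' with rfl | hs'
      · left; rcases hu with rfl | rfl <;> simp [PySem.Set.mem_add]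
      · right; exact ⟨s', hs', hu⟩

-- cross condition, even case: both subsets contain x, a complement never does
theorem pvCross_even {x : Int} {rest s t : List Int} (hs : x ∈ s) (ht : x ∈ t) :
    pvFz t ≠ pvFz ((x :: rest).filter (fun j => decide (j ∉ pvFz s))) := by
  intro heq
  have h1 : x ∈ ((x :: rest).filter (fun j => decide (j ∉ pvFz s))) := by
    have hx : x ∈ t.toFinset := by simpa using ht
    rw [pvFz_eq_iff.mp heq] at hx
    simpa using hx
  have := (List.mem_filter.mp h1).2
  simp only [decide_eq_true_eq, pvMem_fz] at this
  exact this hs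

-- cross condition, odd case: a subset and a complement have different sizes
theorem pvCross_card {l s t : List Int} (hnd : l.Nodup) (hs : s.Sublist l) (ht : t.Sublist l)
    (hlen : t.length + s.length ≠ l.length) :
    pvFz t ≠ pvFz (l.filter (fun j => decide (j ∉ pvFz s))) := by
  intro heq
  have htf := pvFz_eq_iff.mp heq
  have h1 : t.toFinset.card = t.length := List.toFinset_card_of_nodup (ht.nodup hnd)
  have hcnd : (l.filter (fun j => decide (j ∉ pvFz s))).Nodup := hnd.filter _
  have h2 : (l.filter (fun j => decide (j ∉ pvFz s))).toFinset.card
      = (l.filter (fun j => decide (j ∉ pvFz s))).length := List.toFinset_card_of_nodup hcnd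
  have h3 := pvComp_length hs hnd
  rw [htf, h2] at h1
  omega

theorem pvFilter_not_length {q rest : List Int} (hq : q.Sublist rest) (hnd : rest.Nodup) :
    (rest.filter (fun j => decide (j ∉ q))).length + q.length = rest.length := by
  have hsplit := List.length_eq_length_filter_add (l := rest) (fun j => decide (j ∈ q))
  have h2 : (rest.filter fun j => !decide (j ∈ q)) = rest.filter (fun j => decide (j ∉ q)) := by
    apply List.filter_congr; intro j _; simp
  rw [h2, pvFilter_mem_of_sublist hq hnd] at hsplit
  omega

-- in the even case, the complement of x :: (rest \ q) is exactly q as a set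
theorem pvComp_toFinset_eq (x : Int) (rest q : List Int) (hx : x ∉ rest) (hq : q.Sublist rest) :
    ((x :: rest).filter
        (fun j => decide (j ∉ pvFz (x :: rest.filter (fun j => decide (j ∉ q)))))).toFinset
      = q.toFinset := by
  ext j
  have hqr : j ∈ q → j ∈ rest := fun h => hq.subset h
  have hxq : j = x → j ∉ q := fun he h => hx (he ▸ hqr h)
  simp only [List.mem_toFinset, List.mem_filter, List.mem_cons, decide_eq_true_eq, pvMem_fz]
  constructor
  · rintro ⟨hj, hns⟩
    rcases hj with rfl | hj
    · exact absurd (Or.inl rfl) hns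
    · by_contra hjq
      exact hns (Or.inr ⟨hj, hjq⟩)
  · intro hjq
    refine ⟨Or.inr (hqr hjq), ?_⟩
    rintro (rfl | ⟨hjr, hjq'⟩)
    · exact hxq rfl hjq
    · exact hjq' hjq

-- ===== VERDICT (by name: the statement is the Claim_ definition above) =====
theorem get_subsets_of_size_exclude_symmetric_py_spec : Claim_equal_get_subsets_of_size_exclude_symmetric_py := by
  intro indices k _hdom hpre
  obtain ⟨hk0, hnd⟩ := hpre
  have hknn : ¬ k < 0 := not_lt.mpr hk0
  have hfd : PySem.Int.floordiv (indices.length : Int) 2 = (indices.length : Int) / 2 :=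
    PySem.Int.floordiv_eq_ediv_of_pos (by norm_num)
  have hkc : (k.toNat : Int) = k := Int.toNat_of_nonneg hk0
  show get_subsets_of_size_exclude_symmetric_py indices k
      = get_subsets_of_size_exclude_symmetric_py_alt indices k
  by_cases hsymF : k = PySem.Int.floordiv (indices.length : Int) 2
  · -- symmetric case of A
    have hnodup := hnd hsymF
    have hsym : k = (indices.length : Int) / 2 := by rw [← hfd]; exact hsymF
    have hA : get_subsets_of_size_exclude_symmetric_py indices k
        = ((if k < 0 then [] else pvCombos k.toNat indices).foldl
            (pvStepA indices) ([], PySem.Set.empty)).1 := by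
      simp only [get_subsets_of_size_exclude_symmetric_py]
      rw [if_neg (not_not.mpr hsymF)]
    rw [if_neg hknn] at hA
    cases indices with
    | nil =>
      have hk0' : k = 0 := by simpa using hsym
      subst hk0'
      rw [hA]
      decide
    | cons x rest =>
      have hx : x ∉ rest := (List.nodup_cons.mp hnodup).1
      have hrest : rest.Nodup := (List.nodup_cons.mp hnodup).2
      have hlc : ((x :: rest).length : Int) = (rest.length : Int) + 1 := by
        simp [List.length_cons]
      by_cases heven : 2 * k = (rest.length : Int) + 1
      · -- even length: the loop keeps exactly the subsets containing x
        have hk1 : 1 ≤ k := by omega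
        have hkt : k.toNat = (k - 1).toNat + 1 := by omega
        have hk1c : ((k - 1).toNat : Int) = k - 1 := Int.toNat_of_nonneg (by omega)
        have hmlen : rest.length = 2 * (k - 1).toNat + 1 := by omega
        set m := (k - 1).toNat with hm
        set P := (pvCombos m rest).map (fun c => x :: c) with hPdef
        set Q := pvCombos (m + 1) rest with hQdef
        have hsplit : pvCombos k.toNat (x :: rest) = P ++ Q := by
          rw [hkt]; rfl
        have hPx : ∀ s ∈ P, x ∈ s := by
          intro s hs
          obtain ⟨c, _, rfl⟩ := List.mem_map.mp hs
          simp
        have hpwPQ := pvCombos_pairwise (x :: rest) hnodup k.toNat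
        rw [hsplit] at hpwPQ
        have hpwP : P.Pairwise (fun a b => pvFz a ≠ pvFz b) :=
          ((List.pairwise_append.mp hpwPQ).1).imp (fun h heq => h (pvFz_eq_iff.mp heq))
        obtain ⟨hkeep1, hkeep2⟩ := pvFoldl_keep (x :: rest) P [] PySem.Set.empty
          (by intro s _; simp [PySem.Set.empty])
          hpwP
          (by intro s hs t ht; exact pvCross_even (hPx s hs) (hPx t ht))
        have hstate : ∀ q ∈ Q,
            pvFz q ∈ (P.foldl (pvStepA (x :: rest)) ([], PySem.Set.empty)).2 := by
          intro q hq
          obtain ⟨hqsub, hqlen⟩ := pvCombos_sublist rest (m + 1) q hq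
          have hcsub : (rest.filter (fun j => decide (j ∉ q))).Sublist rest :=
            List.filter_sublist
          have hclen : (rest.filter (fun j => decide (j ∉ q))).length = m := by
            have := pvFilter_not_length hqsub hrest
            omega
          have hcmem : (rest.filter (fun j => decide (j ∉ q))) ∈ pvCombos m rest := by
            rw [← hclen]; exact pvCombos_complete hcsub
          have hsP : (x :: rest.filter (fun j => decide (j ∉ q))) ∈ P :=
            List.mem_map.mpr ⟨_, hcmem, rfl⟩
          have hfzeq :
              pvFz ((x :: rest).filter (fun j =>
                decide (j ∉ pvFz (x :: rest.filter (fun j => decide (j ∉ q)))))) = pvFz q :=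
            pvFz_eq_iff.mpr (pvComp_toFinset_eq x rest q hx hqsub)
          exact hkeep2 _ (Or.inr ⟨_, hsP, Or.inr hfzeq.symm⟩)
        have hskip := pvFoldl_skip (x :: rest) Q
          (P.foldl (pvStepA (x :: rest)) ([], PySem.Set.empty)).1
          (P.foldl (pvStepA (x :: rest)) ([], PySem.Set.empty)).2 hstate
        rw [hA, hsplit, List.foldl_append]
        rw [hskip, hkeep1]
        show [] ++ P = get_subsets_of_size_exclude_symmetric_py_alt (x :: rest) k
        simp only [get_subsets_of_size_exclude_symmetric_py_alt]
        rw [if_pos heven, hPdef, hm]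
        simp
      · -- odd length: the loop keeps everything
        have hlen_odd : (x :: rest).length = 2 * k.toNat + 1 := by
          simp only [List.length_cons]
          omega
        obtain ⟨hkeep1, _⟩ := pvFoldl_keep (x :: rest) (pvCombos k.toNat (x :: rest)) []
          PySem.Set.empty
          (by intro s _; simp [PySem.Set.empty])
          ((pvCombos_pairwise (x :: rest) hnodup k.toNat).imp
            (fun h heq => h (pvFz_eq_iff.mp heq)))
          (by
            intro s hs t ht
            obtain ⟨hssub, hslen⟩ := pvCombos_sublist (x :: rest) k.toNat s hs
            obtain ⟨htsub, htlen⟩ := pvCombos_sublist (x :: rest) k.toNat t ht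
            exact pvCross_card hnodup hssub htsub (by omega))
        rw [hA, hkeep1]
        simp only [get_subsets_of_size_exclude_symmetric_py_alt]
        rw [if_neg heven, if_neg hknn]
        simp
  · -- non-symmetric case: A returns the combinations unchanged
    have hA : get_subsets_of_size_exclude_symmetric_py indices k
        = (if k < 0 then [] else pvCombos k.toNat indices) := by
      simp only [get_subsets_of_size_exclude_symmetric_py]
      rw [if_pos hsymF]
    cases indices with
    | nil =>
      rw [hA]
      simp only [get_subsets_of_size_exclude_symmetric_py_alt]
    | cons x rest =>
      have hne : ¬ (2 * k = (rest.length : Int) + 1) := by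
        intro h
        apply hsymF
        rw [hfd]
        have hlc : ((x :: rest).length : Int) = (rest.length : Int) + 1 := by
          simp [List.length_cons]
        omega
      rw [hA]
      simp only [get_subsets_of_size_exclude_symmetric_py_alt]
      rw [if_neg hne]
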